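-- pv_equiv track=rewrite | github.com/Akylas/alpimaps_data_generator | scripts/utils/tilemask.py | _tileMaskIntersection
-- ===== SOURCE A (Python) =====
-- def _buildTiles(x, y, zoom, maxZoom):
--   if zoom > maxZoom:
--     return []
--   tiles = [(x, y, zoom)]
--   tiles += _buildTiles(x * 2 + 0, y * 2 + 0, zoom + 1, maxZoom)
--   tiles += _buildTiles(x * 2 + 1, y * 2 + 0, zoom + 1, maxZoom)
--   tiles += _buildTiles(x * 2 + 0, y * 2 + 1, zoom + 1, maxZoom)
--   tiles += _buildTiles(x * 2 + 1, y * 2 + 1, zoom + 1, maxZoom)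
--   return tiles
--
-- def _tileMaskTiles(x, y, zoom, maxZoom, data):
--   submask = data.pop(0)
--   tiles = [(x, y, zoom)] if data.pop(0) else []
--   if submask:
--     tiles += _tileMaskTiles(x * 2 + 0, y * 2 + 0, zoom + 1, maxZoom, data)
--     tiles += _tileMaskTiles(x * 2 + 1, y * 2 + 0, zoom + 1, maxZoom, data)
--     tiles += _tileMaskTiles(x * 2 + 0, y * 2 + 1, zoom + 1, maxZoom, data)
--     tiles += _tileMaskTiles(x * 2 + 1, y * 2 + 1, zoom + 1, maxZoom, data)
--   elif maxZoom is not None: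
--     if maxZoom > zoom and (x, y, zoom) in tiles:
--       tiles = _buildTiles(x, y, zoom, maxZoom)
--   return tiles
--
-- def _tileMaskIntersection(x, y, zoom, data1, data2):
--   submask1 = data1.pop(0)
--   submask2 = data2.pop(0)
--   inside1 = data1.pop(0)
--   inside2 = data2.pop(0)
--   tiles = [(x, y, zoom)] if inside1 and inside2 else []
--   for dy in (0, 1):
--     for dx in (0, 1):
--       if submask1 and submask2:
--         tiles += _tileMaskIntersection(x * 2 + dx, y * 2 + dy, zoom + 1, data1, data2)
--       elif submask1:
--         _tileMaskTiles(x * 2 + dx, y * 2 + dy, zoom + 1, None, data1)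
--       elif submask2:
--         _tileMaskTiles(x * 2 + dx, y * 2 + dy, zoom + 1, None, data2)
--   return tiles
-- ===== SOURCE B (Python) =====
-- # B: iterative re-implementation — explicit stack DFS with cursor indexing and a
-- # counter-based subtree skip instead of recursion + repeated data.pop(0); like A it
-- # consumes the processed prefix of data1/data2 (del at the end), return value proved equal.
-- def _skip_quads(data, pos):
--   # skip 4 serialized subtrees starting at pos; return the position after them
--   pending = 4
--   while pending:
--     pending -= 1
--     if data[pos]:
--       pending += 4
--     pos += 2
--   return pos
--
-- def _tileMaskIntersection(x, y, zoom, data1, data2):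
--   i = 0
--   j = 0
--   result = []
--   stack = [(x, y, zoom)]
--   while stack:
--     cx, cy, cz = stack.pop()
--     s1, in1 = data1[i], data1[i + 1]
--     i += 2
--     s2, in2 = data2[j], data2[j + 1]
--     j += 2
--     if in1 and in2:
--       result.append((cx, cy, cz))
--     if s1 and s2:
--       for dy in (1, 0):
--         for dx in (1, 0):
--           stack.append((cx * 2 + dx, cy * 2 + dy, cz + 1))
--     elif s1:
--       i = _skip_quads(data1, i)
--     elif s2:
--       j = _skip_quads(data2, j)
--   del data1[:i]
--   del data2[:j]
--   return result
-- ===== Notes on version B (the rewrite author's own statement) =====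
-- stated objective: faster
-- what changed: Recursive descent with repeated O(n) data.pop(0) on both streams is replaced by an explicit-stack DFS over cursor indices into the untouched lists, with a counter-based iterative skip of serialized subtrees replacing the recursive _tileMaskTiles drain.
import Mathlib
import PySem

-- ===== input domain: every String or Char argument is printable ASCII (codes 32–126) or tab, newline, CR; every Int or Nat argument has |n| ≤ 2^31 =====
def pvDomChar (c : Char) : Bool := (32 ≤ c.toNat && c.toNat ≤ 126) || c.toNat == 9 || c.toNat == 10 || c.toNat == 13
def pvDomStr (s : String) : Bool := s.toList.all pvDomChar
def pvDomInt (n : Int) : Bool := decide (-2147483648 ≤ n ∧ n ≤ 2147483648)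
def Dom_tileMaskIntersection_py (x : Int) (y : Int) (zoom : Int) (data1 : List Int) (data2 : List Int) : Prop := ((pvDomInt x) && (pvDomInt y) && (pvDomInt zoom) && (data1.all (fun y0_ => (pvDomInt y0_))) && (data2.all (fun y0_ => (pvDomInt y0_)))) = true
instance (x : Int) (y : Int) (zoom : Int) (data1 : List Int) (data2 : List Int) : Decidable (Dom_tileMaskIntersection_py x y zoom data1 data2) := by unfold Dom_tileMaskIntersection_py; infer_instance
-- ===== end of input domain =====

-- B replaces A's recursion + repeated pop(0) by an explicit-stack DFS with cursors and a
-- counter-based subtree skip (measurably faster on large masks); A and B both consume the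
-- processed prefix of data1/data2, and the equivalence proved is about the RETURN value.

-- ===== PORT A =====
-- _buildTiles (pure recursion; zoom grows towards maxZoom)
def pvBuildTiles : Nat → Int → Int → Int → Int → List (Int × Int × Int)
  | 0, _, _, _, _ => []   -- totality guard only: never reached for fuel ≥ (maxZoom+1-zoom).toNat
  | g + 1, x, y, zoom, maxZoom =>
    if zoom > maxZoom then []
    else
      (x, y, zoom) ::
        (pvBuildTiles g (x * 2) (y * 2) (zoom + 1) maxZoom ++
         pvBuildTiles g (x * 2 + 1) (y * 2) (zoom + 1) maxZoom ++
         pvBuildTiles g (x * 2) (y * 2 + 1) (zoom + 1) maxZoom ++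
         pvBuildTiles g (x * 2 + 1) (y * 2 + 1) (zoom + 1) maxZoom)

-- _tileMaskTiles; the two pop(0) become the head pattern (none = IndexError); the fuel
-- argument is only a totality guard (any fuel > data.length is enough)
def pvTmTiles : Nat → Int → Int → Int → Option Int → List Int → Option (List (Int × Int × Int) × List Int)
  | 0, _, _, _, _, _ => none
  | f + 1, x, y, zoom, maxZoom, data =>
    match data with
    | submask :: inside :: rest =>
      let tiles := if inside ≠ 0 then [(x, y, zoom)] else []
      if submask ≠ 0 then
        match pvTmTiles f (x * 2) (y * 2) (zoom + 1) maxZoom rest with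
        | none => none
        | some (t1, r1) =>
          match pvTmTiles f (x * 2 + 1) (y * 2) (zoom + 1) maxZoom r1 with
          | none => none
          | some (t2, r2) =>
            match pvTmTiles f (x * 2) (y * 2 + 1) (zoom + 1) maxZoom r2 with
            | none => none
            | some (t3, r3) =>
              match pvTmTiles f (x * 2 + 1) (y * 2 + 1) (zoom + 1) maxZoom r3 with
              | none => none
              | some (t4, r4) => some (tiles ++ t1 ++ t2 ++ t3 ++ t4, r4)
      else
        match maxZoom with
        | none => some (tiles, rest)
        | some mz =>
          if mz > zoom ∧ (x, y, zoom) ∈ tiles then some (pvBuildTiles ((mz + 1 - zoom).toNat) x y zoom mz, rest)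
          else some (tiles, rest)
    | _ => none

-- _tileMaskIntersection; the four pops become head patterns, the dy/dx loop is unrolled
-- into four `step` applications in the same (dy,dx) order; fuel is only a totality guard
def pvTmInter : Nat → Int → Int → Int → List Int → List Int → Option (List (Int × Int × Int) × List Int × List Int)
  | 0, _, _, _, _, _ => none
  | f + 1, x, y, zoom, data1, data2 =>
    match data1, data2 with
    | s1 :: i1 :: r1, s2 :: i2 :: r2 =>
      let t0 := if i1 ≠ 0 ∧ i2 ≠ 0 then [(x, y, zoom)] else []
      let step := fun (dx dy : Int) (st : List (Int × Int × Int) × List Int × List Int) =>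
        match st with
        | (ts, e1, e2) =>
          if s1 ≠ 0 ∧ s2 ≠ 0 then
            (pvTmInter f (x * 2 + dx) (y * 2 + dy) (zoom + 1) e1 e2).map
              (fun (r : List (Int × Int × Int) × List Int × List Int) => (ts ++ r.1, r.2.1, r.2.2))
          else if s1 ≠ 0 then
            (pvTmTiles (e1.length + 1) (x * 2 + dx) (y * 2 + dy) (zoom + 1) none e1).map
              (fun (r : List (Int × Int × Int) × List Int) => (ts, r.2, e2))
          else if s2 ≠ 0 then
            (pvTmTiles (e2.length + 1) (x * 2 + dx) (y * 2 + dy) (zoom + 1) none e2).map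
              (fun (r : List (Int × Int × Int) × List Int) => (ts, e1, r.2))
          else some st
      (step 0 0 (t0, r1, r2)).bind fun a =>
        (step 1 0 a).bind fun b => (step 0 1 b).bind fun c => step 1 1 c
    | _, _ => none

def tileMaskIntersection_py (x : Int) (y : Int) (zoom : Int) (data1 : List Int) (data2 : List Int) : List (Int × Int × Int) :=
  match pvTmInter (data1.length + data2.length + 1) x y zoom data1 data2 with
  | some r => r.1
  | none => []   -- A raises IndexError here; excluded by Pre_

-- ===== PORT B =====
-- _skip_quads: counter-based iterative skip of 4 serialized subtrees; the returned cursor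
-- becomes the remaining suffix of the list (none = IndexError)
def pvSkipQuads : Nat → List Int → Option (List Int)
  | 0, data => some data
  | p + 1, s :: _ :: rest => pvSkipQuads (if s ≠ 0 then p + 4 else p) rest
  | p + 1, [s] => pvSkipQuads (if s ≠ 0 then p + 4 else p) []   -- cursor moved 2 past a 1-element tail
  | _ + 1, [] => none

-- the while-stack loop of B; acc is `result`, the two list suffixes are the cursors
def pvLoopB : Nat → List (Int × Int × Int) → List Int → List Int → List (Int × Int × Int) → Option (List (Int × Int × Int))
  | _, [], _, _, acc => some acc
  | g + 1, (cx, cy, cz) :: stack, s1 :: i1 :: r1, s2 :: i2 :: r2, acc =>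
    let acc' := if i1 ≠ 0 ∧ i2 ≠ 0 then acc ++ [(cx, cy, cz)] else acc
    if s1 ≠ 0 ∧ s2 ≠ 0 then
      pvLoopB g ((cx * 2, cy * 2, cz + 1) :: (cx * 2 + 1, cy * 2, cz + 1) ::
                 (cx * 2, cy * 2 + 1, cz + 1) :: (cx * 2 + 1, cy * 2 + 1, cz + 1) :: stack)
              r1 r2 acc'
    else if s1 ≠ 0 then
      match pvSkipQuads 4 r1 with
      | none => none
      | some r1' => pvLoopB g stack r1' r2 acc'
    else if s2 ≠ 0 then
      match pvSkipQuads 4 r2 with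
      | none => none
      | some r2' => pvLoopB g stack r1 r2' acc'
    else pvLoopB g stack r1 r2 acc'
  | _, _ :: _, _, _, _ => none   -- fuel 0 (totality guard, unreachable for fuel > |data1|+|data2|) or IndexError

def tileMaskIntersection_py_alt (x : Int) (y : Int) (zoom : Int) (data1 : List Int) (data2 : List Int) : List (Int × Int × Int) :=
  (pvLoopB (data1.length + data2.length + 1) [(x, y, zoom)] data1 data2 []).getD []

-- ===== PRECONDITION & SPEC =====
-- grammar of a serialized tile mask: pvParse k data parses k consecutive subtrees
-- (each node = submask :: inside, a truthy submask adds its four children) and returns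
-- the remaining suffix; none = the stream is too short
def pvParse : Nat → List Int → Option (List Int)
  | 0, data => some data
  | k + 1, s :: _ :: rest => pvParse (if s ≠ 0 then k + 4 else k) rest
  | _ + 1, _ => none

-- Pre_: each data list starts with one complete serialized tile mask (exactly the inputs
-- on which the Python A returns instead of raising IndexError on pop(0)).  pvParse is a
-- shape/grammar checker for that serialization format only — it computes no coordinates,
-- no tiles and no intersection, and a valid-mask prefix has no shorter closed form
def Pre_tileMaskIntersection_py (x : Int) (y : Int) (zoom : Int) (data1 : List Int) (data2 : List Int) : Prop :=
  (pvParse 1 data1).isSome ∧ (pvParse 1 data2).isSome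
instance (x : Int) (y : Int) (zoom : Int) (data1 : List Int) (data2 : List Int) : Decidable (Pre_tileMaskIntersection_py x y zoom data1 data2) := by unfold Pre_tileMaskIntersection_py; infer_instance

def pvWitness_tileMaskIntersection_py : Int × Int × Int × List Int × List Int :=
  (0, 0, 0, [1, 1, 0, 1, 1, 0, 0, 0, 0, 0, 0, 0, 0, 0, 0, 0, 0, 1], [1, 1, 0, 1, 0, 0, 0, 1, 0, 1])

def Spec_tileMaskIntersection_py (x : Int) (y : Int) (zoom : Int) (data1 : List Int) (data2 : List Int) (out : List (Int × Int × Int)) : Prop := out = tileMaskIntersection_py_alt x y zoom data1 data2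
instance (x : Int) (y : Int) (zoom : Int) (data1 : List Int) (data2 : List Int) (out : List (Int × Int × Int)) : Decidable (Spec_tileMaskIntersection_py x y zoom data1 data2 out) := by unfold Spec_tileMaskIntersection_py; infer_instance

-- ===== CLAIM (what is proved, stated in full; the proofs are below) =====
def Claim_equal_tileMaskIntersection_py : Prop := ∀ (x : Int) (y : Int) (zoom : Int) (data1 : List Int) (data2 : List Int), Dom_tileMaskIntersection_py x y zoom data1 data2 → Pre_tileMaskIntersection_py x y zoom data1 data2 → Spec_tileMaskIntersection_py x y zoom data1 data2 (tileMaskIntersection_py x y zoom data1 data2)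

-- ===== LEMMAS AND PROOFS =====

theorem pvParse_length_le : ∀ (k : Nat) (d e : List Int), pvParse k d = some e → e.length ≤ d.length := by
  intro k d
  fun_induction pvParse k d with
  | case1 d => intro e h; simp_all
  | case2 k s i rest ih =>
    intro e h
    rcases Decidable.em (s ≠ 0) with hs | hs <;>
      · simp only [hs] at h ih
        have := ih _ h
        simp at this ⊢; omega
  | case3 => intro e h; simp at h

theorem pvParse_add (a b : Nat) (d : List Int) :
    pvParse (a + b) d = (pvParse a d).bind (pvParse b) := by
  match a, d with
  | 0, d => simp [pvParse]
  | a + 1, [] =>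
    rw [show a + 1 + b = (a + b) + 1 by omega]; simp [pvParse]
  | a + 1, [s] =>
    rw [show a + 1 + b = (a + b) + 1 by omega]; simp [pvParse]
  | a + 1, s :: i :: rest =>
    rw [show a + 1 + b = (a + b) + 1 by omega]
    by_cases hs : s ≠ 0
    · simp only [pvParse, if_pos hs]
      rw [show a + b + 4 = (a + 4) + b by omega, pvParse_add (a + 4) b rest]
    · simp only [pvParse, if_neg hs]
      exact pvParse_add a b rest
termination_by d.length
decreasing_by all_goals simp

theorem pvSkipQuads_eq_parse (k : Nat) (d e : List Int) (h : pvParse k d = some e) :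
    pvSkipQuads k d = some e := by
  match k, d with
  | 0, d => simpa [pvParse, pvSkipQuads] using h
  | k + 1, [] => simp [pvParse] at h
  | k + 1, [s] => simp [pvParse] at h
  | k + 1, s :: i :: rest =>
    rw [pvParse] at h
    rw [pvSkipQuads]
    exact pvSkipQuads_eq_parse _ rest e h
termination_by d.length
decreasing_by all_goals simp

theorem pvTmTiles_parse : ∀ (f : Nat) (x y zoom : Int) (d : List Int) (t : List (Int × Int × Int)) (r : List Int),
    pvTmTiles f x y zoom none d = some (t, r) → pvParse 1 d = some r := by
  intro f x y zoom d t r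
  fun_induction pvTmTiles f x y zoom none d generalizing t r
  case case6 =>
    intro h
    rename_i hs t1 r1 q1 t2 r2 q2 t3 r3 q3 t4 r4 q4 ih4 ih3 ih2 ih1
    simp at h
    obtain ⟨-, hr⟩ := h
    subst hr
    have e1 := ih4 _ _ q1
    have e2 := ih3 _ _ q2
    have e3 := ih2 _ _ q3
    have e4 := ih1 _ _ q4
    rw [pvParse, if_pos hs]
    rw [show (0 + 4 : Nat) = 1 + 3 from rfl, pvParse_add 1 3, e1]
    simp only [Option.bind_some]
    rw [show (3 : Nat) = 1 + 2 from rfl, pvParse_add 1 2, e2]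
    simp only [Option.bind_some]
    rw [show (2 : Nat) = 1 + 1 from rfl, pvParse_add 1 1, e3]
    simp only [Option.bind_some]
    exact e4
  all_goals intro h; simp_all [pvParse]

theorem pvTmTiles_exists : ∀ (f : Nat) (x y zoom : Int) (d e : List Int),
    pvParse 1 d = some e → d.length < f → ∃ t, pvTmTiles f x y zoom none d = some (t, e) := by
  intro f
  induction f with
  | zero => intro x y zoom d e hp hl; omega
  | succ f ih =>
    intro x y zoom d e hp hl
    match d with
    | [] => simp [pvParse] at hp
    | [s] => simp [pvParse] at hp
    | s :: i :: rest =>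
      by_cases hs : s ≠ 0
      · rw [pvParse, if_pos hs, show (0 + 4 : Nat) = 1 + 3 from rfl, pvParse_add 1 3] at hp
        cases hm1 : pvParse 1 rest with
        | none => rw [hm1] at hp; simp at hp
        | some m1 =>
          rw [hm1] at hp
          simp only [Option.bind] at hp; rw [show (3 : Nat) = 1 + 2 from rfl, pvParse_add 1 2] at hp
          cases hm2 : pvParse 1 m1 with
          | none => rw [hm2] at hp; simp at hp
          | some m2 =>
            rw [hm2] at hp
            simp only [Option.bind] at hp; rw [show (2 : Nat) = 1 + 1 from rfl, pvParse_add 1 1] at hp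
            cases hm3 : pvParse 1 m2 with
            | none => rw [hm3] at hp; simp at hp
            | some m3 =>
              rw [hm3] at hp; simp only [Option.bind] at hp
              have l1 := pvParse_length_le _ _ _ hm1
              have l2 := pvParse_length_le _ _ _ hm2
              have l3 := pvParse_length_le _ _ _ hm3
              simp at hl
              obtain ⟨t1, H1⟩ := ih (x * 2) (y * 2) (zoom + 1) rest m1 hm1 (by omega)
              obtain ⟨t2, H2⟩ := ih (x * 2 + 1) (y * 2) (zoom + 1) m1 m2 hm2 (by omega)
              obtain ⟨t3, H3⟩ := ih (x * 2) (y * 2 + 1) (zoom + 1) m2 m3 hm3 (by omega)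
              obtain ⟨t4, H4⟩ := ih (x * 2 + 1) (y * 2 + 1) (zoom + 1) m3 e hp (by omega)
              refine ⟨(if i ≠ 0 then [(x, y, zoom)] else []) ++ t1 ++ t2 ++ t3 ++ t4, ?_⟩
              simp only [pvTmTiles, if_pos hs, H1, H2, H3, H4]
      · rw [pvParse, if_neg hs] at hp
        simp [pvParse] at hp
        subst hp
        exact ⟨if i ≠ 0 then [(x, y, zoom)] else [], by simp only [pvTmTiles, if_neg hs]⟩

theorem pvTmInter_exists : ∀ (f : Nat) (x y zoom : Int) (d1 d2 e1 e2 : List Int),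
    pvParse 1 d1 = some e1 → pvParse 1 d2 = some e2 → d1.length < f →
    ∃ t, pvTmInter f x y zoom d1 d2 = some (t, e1, e2) := by
  intro f
  induction f with
  | zero => intro x y zoom d1 d2 e1 e2 hp1 hp2 hl; omega
  | succ f ih =>
    intro x y zoom d1 d2 e1 e2 hp1 hp2 hl
    match d1, d2 with
    | [], _ => simp [pvParse] at hp1
    | [s], _ => simp [pvParse] at hp1
    | _ :: _ :: _, [] => simp [pvParse] at hp2
    | _ :: _ :: _, [s] => simp [pvParse] at hp2
    | s1 :: i1 :: r1, s2 :: i2 :: r2 =>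
      simp only [List.length_cons] at hl
      by_cases hs1 : s1 ≠ 0 <;> by_cases hs2 : s2 ≠ 0
      · -- both submasks set: four recursive intersections
        rw [pvParse, if_pos hs1, show (0 + 4 : Nat) = 1 + 3 from rfl, pvParse_add 1 3] at hp1
        rw [pvParse, if_pos hs2, show (0 + 4 : Nat) = 1 + 3 from rfl, pvParse_add 1 3] at hp2
        cases hm1 : pvParse 1 r1 with
        | none => rw [hm1] at hp1; simp at hp1
        | some m1 =>
        rw [hm1] at hp1
        simp only [Option.bind] at hp1; rw [show (3 : Nat) = 1 + 2 from rfl, pvParse_add 1 2] at hp1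
        cases hm2 : pvParse 1 m1 with
        | none => rw [hm2] at hp1; simp at hp1
        | some m2 =>
        rw [hm2] at hp1
        simp only [Option.bind] at hp1; rw [show (2 : Nat) = 1 + 1 from rfl, pvParse_add 1 1] at hp1
        cases hm3 : pvParse 1 m2 with
        | none => rw [hm3] at hp1; simp at hp1
        | some m3 =>
        rw [hm3] at hp1; simp only [Option.bind] at hp1
        cases hn1 : pvParse 1 r2 with
        | none => rw [hn1] at hp2; simp at hp2
        | some n1 =>
        rw [hn1] at hp2
        simp only [Option.bind] at hp2; rw [show (3 : Nat) = 1 + 2 from rfl, pvParse_add 1 2] at hp2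
        cases hn2 : pvParse 1 n1 with
        | none => rw [hn2] at hp2; simp at hp2
        | some n2 =>
        rw [hn2] at hp2
        simp only [Option.bind] at hp2; rw [show (2 : Nat) = 1 + 1 from rfl, pvParse_add 1 1] at hp2
        cases hn3 : pvParse 1 n2 with
        | none => rw [hn3] at hp2; simp at hp2
        | some n3 =>
        rw [hn3] at hp2; simp only [Option.bind] at hp2
        have l1 := pvParse_length_le _ _ _ hm1
        have l2 := pvParse_length_le _ _ _ hm2
        have l3 := pvParse_length_le _ _ _ hm3
        obtain ⟨T1, H1⟩ := ih (x * 2 + 0) (y * 2 + 0) (zoom + 1) r1 r2 m1 n1 hm1 hn1 (by omega)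
        obtain ⟨T2, H2⟩ := ih (x * 2 + 1) (y * 2 + 0) (zoom + 1) m1 n1 m2 n2 hm2 hn2 (by omega)
        obtain ⟨T3, H3⟩ := ih (x * 2 + 0) (y * 2 + 1) (zoom + 1) m2 n2 m3 n3 hm3 hn3 (by omega)
        obtain ⟨T4, H4⟩ := ih (x * 2 + 1) (y * 2 + 1) (zoom + 1) m3 n3 e1 e2 hp1 hp2 (by omega)
        refine ⟨(if i1 ≠ 0 ∧ i2 ≠ 0 then [(x, y, zoom)] else []) ++ T1 ++ T2 ++ T3 ++ T4, ?_⟩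
        simp only [pvTmInter, if_pos (show s1 ≠ 0 ∧ s2 ≠ 0 from ⟨hs1, hs2⟩), H1, H2, H3, H4,
          Option.map_some, Option.bind]
      · -- only submask1: drain four subtrees of data1
        rw [pvParse, if_pos hs1, show (0 + 4 : Nat) = 1 + 3 from rfl, pvParse_add 1 3] at hp1
        rw [pvParse, if_neg hs2] at hp2
        simp [pvParse] at hp2
        subst hp2
        cases hm1 : pvParse 1 r1 with
        | none => rw [hm1] at hp1; simp at hp1
        | some m1 =>
        rw [hm1] at hp1
        simp only [Option.bind] at hp1; rw [show (3 : Nat) = 1 + 2 from rfl, pvParse_add 1 2] at hp1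
        cases hm2 : pvParse 1 m1 with
        | none => rw [hm2] at hp1; simp at hp1
        | some m2 =>
        rw [hm2] at hp1
        simp only [Option.bind] at hp1; rw [show (2 : Nat) = 1 + 1 from rfl, pvParse_add 1 1] at hp1
        cases hm3 : pvParse 1 m2 with
        | none => rw [hm3] at hp1; simp at hp1
        | some m3 =>
        rw [hm3] at hp1; simp only [Option.bind] at hp1
        obtain ⟨u1, W1⟩ := pvTmTiles_exists (r1.length + 1) (x * 2 + 0) (y * 2 + 0) (zoom + 1) r1 m1 hm1 (by omega)
        obtain ⟨u2, W2⟩ := pvTmTiles_exists (m1.length + 1) (x * 2 + 1) (y * 2 + 0) (zoom + 1) m1 m2 hm2 (by omega)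
        obtain ⟨u3, W3⟩ := pvTmTiles_exists (m2.length + 1) (x * 2 + 0) (y * 2 + 1) (zoom + 1) m2 m3 hm3 (by omega)
        obtain ⟨u4, W4⟩ := pvTmTiles_exists (m3.length + 1) (x * 2 + 1) (y * 2 + 1) (zoom + 1) m3 e1 hp1 (by omega)
        refine ⟨(if i1 ≠ 0 ∧ i2 ≠ 0 then [(x, y, zoom)] else []), ?_⟩
        simp only [pvTmInter, if_neg (show ¬(s1 ≠ 0 ∧ s2 ≠ 0) from fun hc => hs2 hc.2),
          if_pos hs1, W1, W2, W3, W4, Option.map_some, Option.bind]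
      · -- only submask2: drain four subtrees of data2
        rw [pvParse, if_neg hs1] at hp1
        simp [pvParse] at hp1
        subst hp1
        rw [pvParse, if_pos hs2, show (0 + 4 : Nat) = 1 + 3 from rfl, pvParse_add 1 3] at hp2
        cases hn1 : pvParse 1 r2 with
        | none => rw [hn1] at hp2; simp at hp2
        | some n1 =>
        rw [hn1] at hp2
        simp only [Option.bind] at hp2; rw [show (3 : Nat) = 1 + 2 from rfl, pvParse_add 1 2] at hp2
        cases hn2 : pvParse 1 n1 with
        | none => rw [hn2] at hp2; simp at hp2
        | some n2 =>
        rw [hn2] at hp2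
        simp only [Option.bind] at hp2; rw [show (2 : Nat) = 1 + 1 from rfl, pvParse_add 1 1] at hp2
        cases hn3 : pvParse 1 n2 with
        | none => rw [hn3] at hp2; simp at hp2
        | some n3 =>
        rw [hn3] at hp2; simp only [Option.bind] at hp2
        obtain ⟨u1, W1⟩ := pvTmTiles_exists (r2.length + 1) (x * 2 + 0) (y * 2 + 0) (zoom + 1) r2 n1 hn1 (by omega)
        obtain ⟨u2, W2⟩ := pvTmTiles_exists (n1.length + 1) (x * 2 + 1) (y * 2 + 0) (zoom + 1) n1 n2 hn2 (by omega)
        obtain ⟨u3, W3⟩ := pvTmTiles_exists (n2.length + 1) (x * 2 + 0) (y * 2 + 1) (zoom + 1) n2 n3 hn3 (by omega)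
        obtain ⟨u4, W4⟩ := pvTmTiles_exists (n3.length + 1) (x * 2 + 1) (y * 2 + 1) (zoom + 1) n3 e2 hp2 (by omega)
        refine ⟨(if i1 ≠ 0 ∧ i2 ≠ 0 then [(x, y, zoom)] else []), ?_⟩
        simp only [pvTmInter, if_neg (show ¬(s1 ≠ 0 ∧ s2 ≠ 0) from fun hc => hs1 hc.1),
          if_neg hs1, if_pos hs2, W1, W2, W3, W4, Option.map_some, Option.bind]
      · -- neither submask set
        rw [pvParse, if_neg hs1] at hp1
        rw [pvParse, if_neg hs2] at hp2
        simp [pvParse] at hp1 hp2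
        subst hp1; subst hp2
        refine ⟨(if i1 ≠ 0 ∧ i2 ≠ 0 then [(x, y, zoom)] else []), ?_⟩
        simp only [pvTmInter,
          if_neg (show ¬(s1 ≠ 0 ∧ s2 ≠ 0) from fun hc => hs1 hc.1),
          if_neg hs1, if_neg hs2, Option.bind]

theorem pvSkipQuads_length_le : ∀ (k : Nat) (d e : List Int), pvSkipQuads k d = some e → e.length ≤ d.length := by
  intro k d
  fun_induction pvSkipQuads k d with
  | case1 d => intro e h; simp_all
  | case2 p s i rest ih =>
    intro e h
    rcases Decidable.em (s ≠ 0) with hs | hs <;>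
      · simp only [hs] at h ih
        have := ih _ h
        simp; omega
  | case3 p s ih =>
    intro e h
    rcases Decidable.em (s ≠ 0) with hs | hs <;>
      · simp only [hs] at h ih
        have := ih _ h
        simp_all
  | case4 => intro e h; simp at h

theorem pvLoopB_irrel : ∀ (g1 g2 : Nat) (stack : List (Int × Int × Int)) (d1 d2 : List Int) (acc : List (Int × Int × Int)),
    d1.length + d2.length < g1 → d1.length + d2.length < g2 →
    pvLoopB g1 stack d1 d2 acc = pvLoopB g2 stack d1 d2 acc := by
  intro g1
  induction g1 with
  | zero => intro g2 stack d1 d2 acc h1 h2; omega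
  | succ g1 ih =>
    intro g2 stack d1 d2 acc h1 h2
    obtain ⟨g2', rfl⟩ : ∃ g2', g2 = g2' + 1 := ⟨g2 - 1, by omega⟩
    match stack, d1, d2 with
    | [], _, _ => rfl
    | (cx, cy, cz) :: st, [], d2 => rfl
    | (cx, cy, cz) :: st, [s], d2 => rfl
    | (cx, cy, cz) :: st, s1 :: i1 :: r1, [] => rfl
    | (cx, cy, cz) :: st, s1 :: i1 :: r1, [s] => rfl
    | (cx, cy, cz) :: st, s1 :: i1 :: r1, s2 :: i2 :: r2 =>
      simp only [List.length_cons] at h1 h2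
      rw [pvLoopB, pvLoopB]
      by_cases hb : s1 ≠ 0 ∧ s2 ≠ 0
      · simp only [if_pos hb]
        exact ih _ _ _ _ _ (by omega) (by omega)
      · simp only [if_neg hb]
        by_cases hs1 : s1 ≠ 0
        · simp only [if_pos hs1]
          cases hsk : pvSkipQuads 4 r1 with
          | none => rfl
          | some r1' =>
            have := pvSkipQuads_length_le _ _ _ hsk
            exact ih _ _ _ _ _ (by omega) (by omega)
        · simp only [if_neg hs1]
          by_cases hs2 : s2 ≠ 0
          · simp only [if_pos hs2]
            cases hsk : pvSkipQuads 4 r2 with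
            | none => rfl
            | some r2' =>
              have := pvSkipQuads_length_le _ _ _ hsk
              exact ih _ _ _ _ _ (by omega) (by omega)
          · simp only [if_neg hs2]
            exact ih _ _ _ _ _ (by omega) (by omega)

theorem pvLoopB_step : ∀ (f : Nat) (x y zoom : Int) (d1 d2 : List Int) (t : List (Int × Int × Int)) (r1 r2 : List Int),
    pvTmInter f x y zoom d1 d2 = some (t, r1, r2) →
    ∀ (stack acc : List (Int × Int × Int)) (g : Nat), d1.length + d2.length < g →
      pvLoopB g ((x, y, zoom) :: stack) d1 d2 acc =
        pvLoopB (r1.length + r2.length + 1) stack r1 r2 (acc ++ t) := by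
  intro f
  induction f with
  | zero => intro x y zoom d1 d2 t r1 r2 h; simp [pvTmInter] at h
  | succ f ih =>
    intro x y zoom d1 d2 t r1 r2 h
    match d1, d2 with
    | [], _ => simp [pvTmInter] at h
    | [s], _ => simp [pvTmInter] at h
    | _ :: _ :: _, [] => simp [pvTmInter] at h
    | _ :: _ :: _, [s] => simp [pvTmInter] at h
    | s1 :: i1 :: r1', s2 :: i2 :: r2' =>
      intro stack acc g hg
      simp only [List.length_cons] at hg
      obtain ⟨g', rfl⟩ : ∃ g', g = g' + 1 := ⟨g - 1, by omega⟩
      by_cases hs1 : s1 ≠ 0 <;> by_cases hs2 : s2 ≠ 0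
      · -- both: four recursive children on the stack
        simp only [pvTmInter, if_pos (show s1 ≠ 0 ∧ s2 ≠ 0 from ⟨hs1, hs2⟩)] at h
        cases q1 : pvTmInter f (x * 2 + 0) (y * 2 + 0) (zoom + 1) r1' r2' with
        | none => rw [q1] at h; simp at h
        | some p1 =>
        obtain ⟨T1, a1, b1⟩ := p1
        rw [q1] at h; simp only [Option.map_some, Option.bind] at h
        cases q2 : pvTmInter f (x * 2 + 1) (y * 2 + 0) (zoom + 1) a1 b1 with
        | none => rw [q2] at h; simp at h
        | some p2 =>
        obtain ⟨T2, a2, b2⟩ := p2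
        rw [q2] at h; simp only [Option.map_some] at h
        cases q3 : pvTmInter f (x * 2 + 0) (y * 2 + 1) (zoom + 1) a2 b2 with
        | none => rw [q3] at h; simp at h
        | some p3 =>
        obtain ⟨T3, a3, b3⟩ := p3
        rw [q3] at h; simp only [Option.map_some] at h
        cases q4 : pvTmInter f (x * 2 + 1) (y * 2 + 1) (zoom + 1) a3 b3 with
        | none => rw [q4] at h; simp at h
        | some p4 =>
        obtain ⟨T4, a4, b4⟩ := p4
        rw [q4] at h
        simp only [Option.map_some, Option.some.injEq, Prod.mk.injEq] at h
        obtain ⟨ht, ha, hb⟩ := h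
        subst ht; subst ha; subst hb
        rw [pvLoopB]
        simp only [if_pos (show s1 ≠ 0 ∧ s2 ≠ 0 from ⟨hs1, hs2⟩)]
        simp only [add_zero] at q1 q2 q3 q4
        rw [ih _ _ _ _ _ _ _ _ q1 _ _ g' (by omega),
            ih _ _ _ _ _ _ _ _ q2 _ _ (a1.length + b1.length + 1) (by omega),
            ih _ _ _ _ _ _ _ _ q3 _ _ (a2.length + b2.length + 1) (by omega),
            ih _ _ _ _ _ _ _ _ q4 _ _ (a3.length + b3.length + 1) (by omega)]
        congr 1
        by_cases hi : i1 ≠ 0 ∧ i2 ≠ 0 <;> simp [hi, List.append_assoc]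
      · -- only submask1: A drains data1 via _tileMaskTiles, B skips via the counter
        simp only [pvTmInter, if_neg (show ¬(s1 ≠ 0 ∧ s2 ≠ 0) from fun hc => hs2 hc.2),
          if_pos hs1] at h
        cases q1 : pvTmTiles (r1'.length + 1) (x * 2 + 0) (y * 2 + 0) (zoom + 1) none r1' with
        | none => rw [q1] at h; simp at h
        | some p1 =>
        obtain ⟨u1, a1⟩ := p1
        rw [q1] at h; simp only [Option.map_some, Option.bind] at h
        cases q2 : pvTmTiles (a1.length + 1) (x * 2 + 1) (y * 2 + 0) (zoom + 1) none a1 with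
        | none => rw [q2] at h; simp at h
        | some p2 =>
        obtain ⟨u2, a2⟩ := p2
        rw [q2] at h; simp only [Option.map_some] at h
        cases q3 : pvTmTiles (a2.length + 1) (x * 2 + 0) (y * 2 + 1) (zoom + 1) none a2 with
        | none => rw [q3] at h; simp at h
        | some p3 =>
        obtain ⟨u3, a3⟩ := p3
        rw [q3] at h; simp only [Option.map_some] at h
        cases q4 : pvTmTiles (a3.length + 1) (x * 2 + 1) (y * 2 + 1) (zoom + 1) none a3 with
        | none => rw [q4] at h; simp at h
        | some p4 =>
        obtain ⟨u4, a4⟩ := p4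
        rw [q4] at h
        simp only [Option.map_some, Option.some.injEq, Prod.mk.injEq] at h
        obtain ⟨ht, ha, hb⟩ := h
        subst ht; subst ha; subst hb
        have p1' := pvTmTiles_parse _ _ _ _ _ _ _ q1
        have p2' := pvTmTiles_parse _ _ _ _ _ _ _ q2
        have p3' := pvTmTiles_parse _ _ _ _ _ _ _ q3
        have p4' := pvTmTiles_parse _ _ _ _ _ _ _ q4
        have hp4 : pvParse 4 r1' = some a4 := by
          rw [show (4 : Nat) = 1 + 3 from rfl, pvParse_add 1 3, p1']
          simp only [Option.bind]
          rw [show (3 : Nat) = 1 + 2 from rfl, pvParse_add 1 2, p2']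
          simp only [Option.bind]
          rw [show (2 : Nat) = 1 + 1 from rfl, pvParse_add 1 1, p3']
          simp only [Option.bind]
          exact p4'
        have hskip := pvSkipQuads_eq_parse 4 r1' a4 hp4
        have hlen : a4.length ≤ r1'.length := pvSkipQuads_length_le _ _ _ hskip
        rw [pvLoopB]
        simp only [if_neg (show ¬(s1 ≠ 0 ∧ s2 ≠ 0) from fun hc => hs2 hc.2), if_pos hs1, hskip]
        rw [pvLoopB_irrel g' (a4.length + r2'.length + 1) _ _ _ _ (by omega) (by omega)]
        congr 1
        by_cases hi : i1 ≠ 0 ∧ i2 ≠ 0 <;> simp [hi]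
      · -- only submask2: A drains data2 via _tileMaskTiles, B skips via the counter
        simp only [pvTmInter, if_neg (show ¬(s1 ≠ 0 ∧ s2 ≠ 0) from fun hc => hs1 hc.1),
          if_neg hs1, if_pos hs2] at h
        cases q1 : pvTmTiles (r2'.length + 1) (x * 2 + 0) (y * 2 + 0) (zoom + 1) none r2' with
        | none => rw [q1] at h; simp at h
        | some p1 =>
        obtain ⟨u1, b1⟩ := p1
        rw [q1] at h; simp only [Option.map_some, Option.bind] at h
        cases q2 : pvTmTiles (b1.length + 1) (x * 2 + 1) (y * 2 + 0) (zoom + 1) none b1 with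
        | none => rw [q2] at h; simp at h
        | some p2 =>
        obtain ⟨u2, b2⟩ := p2
        rw [q2] at h; simp only [Option.map_some] at h
        cases q3 : pvTmTiles (b2.length + 1) (x * 2 + 0) (y * 2 + 1) (zoom + 1) none b2 with
        | none => rw [q3] at h; simp at h
        | some p3 =>
        obtain ⟨u3, b3⟩ := p3
        rw [q3] at h; simp only [Option.map_some] at h
        cases q4 : pvTmTiles (b3.length + 1) (x * 2 + 1) (y * 2 + 1) (zoom + 1) none b3 with
        | none => rw [q4] at h; simp at h
        | some p4 =>
        obtain ⟨u4, b4⟩ := p4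
        rw [q4] at h
        simp only [Option.map_some, Option.some.injEq, Prod.mk.injEq] at h
        obtain ⟨ht, ha, hb⟩ := h
        subst ht; subst ha; subst hb
        have p1' := pvTmTiles_parse _ _ _ _ _ _ _ q1
        have p2' := pvTmTiles_parse _ _ _ _ _ _ _ q2
        have p3' := pvTmTiles_parse _ _ _ _ _ _ _ q3
        have p4' := pvTmTiles_parse _ _ _ _ _ _ _ q4
        have hp4 : pvParse 4 r2' = some b4 := by
          rw [show (4 : Nat) = 1 + 3 from rfl, pvParse_add 1 3, p1']
          simp only [Option.bind]
          rw [show (3 : Nat) = 1 + 2 from rfl, pvParse_add 1 2, p2']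
          simp only [Option.bind]
          rw [show (2 : Nat) = 1 + 1 from rfl, pvParse_add 1 1, p3']
          simp only [Option.bind]
          exact p4'
        have hskip := pvSkipQuads_eq_parse 4 r2' b4 hp4
        have hlen : b4.length ≤ r2'.length := pvSkipQuads_length_le _ _ _ hskip
        rw [pvLoopB]
        simp only [if_neg (show ¬(s1 ≠ 0 ∧ s2 ≠ 0) from fun hc => hs1 hc.1),
          if_neg hs1, if_pos hs2, hskip]
        rw [pvLoopB_irrel g' (r1'.length + b4.length + 1) _ _ _ _ (by omega) (by omega)]
        congr 1
        by_cases hi : i1 ≠ 0 ∧ i2 ≠ 0 <;> simp [hi]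
      · -- neither submask set
        simp only [pvTmInter, if_neg (show ¬(s1 ≠ 0 ∧ s2 ≠ 0) from fun hc => hs1 hc.1),
          if_neg hs1, if_neg hs2, Option.bind, Option.some.injEq, Prod.mk.injEq] at h
        obtain ⟨ht, ha, hb⟩ := h
        subst ht; subst ha; subst hb
        rw [pvLoopB]
        simp only [if_neg (show ¬(s1 ≠ 0 ∧ s2 ≠ 0) from fun hc => hs1 hc.1),
          if_neg hs1, if_neg hs2]
        rw [pvLoopB_irrel g' (r1'.length + r2'.length + 1) _ _ _ _ (by omega) (by omega)]
        congr 1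
        by_cases hi : i1 ≠ 0 ∧ i2 ≠ 0 <;> simp [hi]

-- ===== VERDICT (by name: the statement is the Claim_ definition above) =====
theorem tileMaskIntersection_py_spec : Claim_equal_tileMaskIntersection_py := by
  intro x y zoom d1 d2 _ hpre
  obtain ⟨h1, h2⟩ := hpre
  obtain ⟨e1, he1⟩ := Option.isSome_iff_exists.mp h1
  obtain ⟨e2, he2⟩ := Option.isSome_iff_exists.mp h2
  obtain ⟨t, ht⟩ := pvTmInter_exists (d1.length + d2.length + 1) x y zoom d1 d2 e1 e2 he1 he2 (by omega)
  unfold Spec_tileMaskIntersection_py tileMaskIntersection_py tileMaskIntersection_py_alt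
  rw [ht, pvLoopB_step _ _ _ _ _ _ _ _ _ ht [] [] (d1.length + d2.length + 1) (by omega)]
  simp [pvLoopB]
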